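-- pv_equiv track=rewrite | github.com/NadiaWahida/framenet_extension | FrameNet/Analyse/Code/get_lus_and_sem_types.py | get_sem_types_dict
-- ===== SOURCE A (Python) =====
-- def get_sem_types_dict(lus_list):
--     """
--     given a list of Lexical Units
--     returns a dictionary of Semantic Types and number of occurrence
--     """
--     sem_types_dict = {}
--     for lu in lus_list:
--         if len(lu['sem_types']) == 0:
--             continue
--         for semType in lu['sem_types']:
--             if semType not in sem_types_dict.keys():
--                 sem_types_dict[semType] = 1
--             else:
--                 sem_types_dict[semType] += 1
--     return sem_types_dict
-- ===== SOURCE B (Python) =====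
-- def get_sem_types_dict(lus_list):
--     """
--     given a list of Lexical Units
--     returns a dictionary of Semantic Types and number of occurrence
--     """
--     flat = [t for lu in lus_list for t in lu['sem_types']]
--     return {k: flat.count(k) for k in dict.fromkeys(flat)}
-- ===== Notes on version B (the rewrite author's own statement) =====
-- stated objective: alternative
-- what changed: Replaces A's single pass maintaining a membership-tested running dict with flattening all sem_types into one list, deduplicating it (first occurrences), and mapping each distinct key to its count.
import Mathlib
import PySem

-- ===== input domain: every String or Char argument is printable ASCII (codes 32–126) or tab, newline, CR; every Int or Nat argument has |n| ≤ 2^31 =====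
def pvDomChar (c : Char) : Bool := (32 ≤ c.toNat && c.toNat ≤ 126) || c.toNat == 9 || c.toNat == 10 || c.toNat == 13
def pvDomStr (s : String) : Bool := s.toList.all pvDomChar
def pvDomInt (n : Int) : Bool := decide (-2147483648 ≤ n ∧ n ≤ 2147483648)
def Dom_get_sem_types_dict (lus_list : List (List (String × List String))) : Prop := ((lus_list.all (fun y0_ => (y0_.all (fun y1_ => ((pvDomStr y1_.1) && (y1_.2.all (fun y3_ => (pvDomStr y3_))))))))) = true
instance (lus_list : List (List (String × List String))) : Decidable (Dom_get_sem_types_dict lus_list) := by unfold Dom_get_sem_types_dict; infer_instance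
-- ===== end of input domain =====

-- B replaces A's running membership-tested dict with flatten + dedup + per-key count; objective: alternative decomposition.

-- ===== PORT A =====
-- literal transliteration of A: dict accumulator, skip empty sem_types, insert-or-increment per semType
def get_sem_types_dict (lus_list : List (List (String × List String))) : List (String × Int) :=
  (lus_list.foldl (fun sem_types_dict lu =>
      -- lu['sem_types'] raises KeyError when absent; Pre_ excludes that, getD [] is unreachable inside Pre_
      let sts := (PySem.Dict.get? (PySem.Dict.mk lu) "sem_types").getD []
      if sts.length == 0 then sem_types_dict
      else sts.foldl (fun d semType =>
          if PySem.Dict.contains d semType = false then PySem.Dict.insert d semType 1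
          else PySem.Dict.insert d semType (PySem.Dict.getD d semType 0 + 1)) sem_types_dict)
    PySem.Dict.empty).items

-- ===== PORT B =====
-- literal transliteration of B: flatten all sem_types, then map each first-occurrence key to its count
def get_sem_types_dict_alt (lus_list : List (List (String × List String))) : List (String × Int) :=
  let flat := lus_list.flatMap (fun lu => (PySem.Dict.get? (PySem.Dict.mk lu) "sem_types").getD [])
  (PySem.List.dedup flat).map (fun k => (k, (PySem.List.count flat k : Int)))

-- ===== PRECONDITION & SPEC =====
-- Pre_ excludes exactly the inputs where Python A raises KeyError: a lexical unit without a 'sem_types' key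
def Pre_get_sem_types_dict (lus_list : List (List (String × List String))) : Prop :=
  ∀ lu ∈ lus_list, PySem.Dict.contains (PySem.Dict.mk lu) "sem_types" = true
instance (lus_list : List (List (String × List String))) : Decidable (Pre_get_sem_types_dict lus_list) := by unfold Pre_get_sem_types_dict; infer_instance
def pvWitness_get_sem_types_dict : (List (List (String × List String))) :=
  [[("sem_types", ["Animate", "Body_part"])], [("sem_types", [])], [("sem_types", ["Animate"])]]

def Spec_get_sem_types_dict (lus_list : List (List (String × List String))) (out : List (String × Int)) : Prop := out = get_sem_types_dict_alt lus_list
instance (lus_list : List (List (String × List String))) (out : List (String × Int)) : Decidable (Spec_get_sem_types_dict lus_list out) := by unfold Spec_get_sem_types_dict; infer_instance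

-- ===== CLAIM (what is proved, stated in full; the proofs are below) =====
def Claim_equal_get_sem_types_dict : Prop := ∀ (lus_list : List (List (String × List String))), Dom_get_sem_types_dict lus_list → Pre_get_sem_types_dict lus_list → Spec_get_sem_types_dict lus_list (get_sem_types_dict lus_list)

-- ===== LEMMAS AND PROOFS =====

-- A's insert-or-increment branch is exactly 'insert k (getD k 0 + 1)'
theorem pv_step_eq :
    (fun (d : PySem.Dict String Int) (semType : String) =>
        if PySem.Dict.contains d semType = false then PySem.Dict.insert d semType 1
        else PySem.Dict.insert d semType (PySem.Dict.getD d semType 0 + 1))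
    = fun d semType => PySem.Dict.insert d semType (PySem.Dict.getD d semType 0 + 1) := by
  funext d t
  by_cases h : PySem.Dict.contains d t = false
  · simp [h, PySem.Dict.getD_of_not_contains d (d0 := 0) h]
  · simp [h]

-- folding the inner loop over each lu's list equals one fold over the flattened list
theorem pv_foldl_flatMap {α β γ : Type} (f : γ → β → γ) (g : α → List β) :
    ∀ (l : List α) (d : γ),
      l.foldl (fun d a => (g a).foldl f d) d = (l.flatMap g).foldl f d := by
  intro l
  induction l with
  | nil => intro d; rfl
  | cons x xs ih => intro d; simp [List.flatMap_cons, List.foldl_append, ih]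

theorem get_sem_types_dict_eq (lus_list : List (List (String × List String))) :
    get_sem_types_dict lus_list = get_sem_types_dict_alt lus_list := by
  unfold get_sem_types_dict get_sem_types_dict_alt
  simp only [pv_step_eq]
  have hif : (fun (d : PySem.Dict String Int) (lu : List (String × List String)) =>
      let sts := (PySem.Dict.get? (PySem.Dict.mk lu) "sem_types").getD []
      if sts.length == 0 then d
      else sts.foldl (fun d semType => PySem.Dict.insert d semType (PySem.Dict.getD d semType 0 + 1)) d)
      = fun d lu => ((PySem.Dict.get? (PySem.Dict.mk lu) "sem_types").getD []).foldl
          (fun d semType => PySem.Dict.insert d semType (PySem.Dict.getD d semType 0 + 1)) d := by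
    funext d lu
    cases h : (PySem.Dict.get? (PySem.Dict.mk lu) "sem_types").getD [] with
    | nil => simp
    | cons a as => simp
  rw [hif, pv_foldl_flatMap, PySem.Dict.foldl_insert_getD_add_one_eq_counter,
      PySem.Dict.items_counter]
  simp [PySem.List.count_eq]

-- ===== VERDICT (by name: the statement is the Claim_ definition above) =====
theorem get_sem_types_dict_spec : Claim_equal_get_sem_types_dict := by
  intro lus_list _ _
  exact (get_sem_types_dict_eq lus_list).symm ▸ rfl
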